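-- pv_equiv track=rewrite | github.com/happyhappyhappyhappy/pythoncode | verifyENV/leven01/mycase.py | initArary
-- ===== SOURCE A (Python) =====
-- def initArary(str1,str2):
--     distance=[]
--     for j in range(len(str1)+1):
--         distance.append([0]*(len(str2)+1))
--         distance[j][0]=1
--     for k in range(len(str2)+1):
--         distance[0][k]=k
--     return distance
-- ===== SOURCE B (Python) =====
-- def initArary(str1, str2):
--     # Build the matrix transposed: one column at a time, then flip with zip.
--     m, n = len(str1), len(str2)
--     cols = [[0] + [1] * m] + [[k] + [0] * m for k in range(1, n + 1)]
--     return [list(row) for row in zip(*cols)]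
-- ===== Notes on version B (the rewrite author's own statement) =====
-- stated objective: alternative
-- what changed: B builds the TRANSPOSE of the matrix (column 0 = [0]+[1]*m, column k = [k]+[0]*m) and flips it with zip(*cols), instead of A's zero-fill row loop followed by a second patching pass over row 0.
import Mathlib
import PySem

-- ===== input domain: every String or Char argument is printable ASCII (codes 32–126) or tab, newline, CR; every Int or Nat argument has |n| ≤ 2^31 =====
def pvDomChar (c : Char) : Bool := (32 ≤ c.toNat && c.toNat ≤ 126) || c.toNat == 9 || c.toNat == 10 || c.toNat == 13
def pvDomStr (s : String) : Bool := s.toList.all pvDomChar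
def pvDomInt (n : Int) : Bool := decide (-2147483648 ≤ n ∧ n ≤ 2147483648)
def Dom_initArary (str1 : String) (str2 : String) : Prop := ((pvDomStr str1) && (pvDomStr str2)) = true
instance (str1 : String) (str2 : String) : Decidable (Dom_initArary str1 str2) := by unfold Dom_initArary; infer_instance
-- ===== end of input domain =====

-- B builds the TRANSPOSE of the matrix (column 0 = [0]+[1]*m, column k = [k]+[0]*m) and
-- flips it with zip(*cols), instead of A's zero-fill row loop plus a row-0 patching pass.


-- ===== PORT A =====
-- literal port: first loop appends a zero row and sets distance[j][0]=1 (index j is the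
-- just-appended last row, always in range, so List.set/getD with j.toNat is exact here);
-- second loop overwrites distance[0][k]=k for k in range(len(str2)+1).
def initArary (str1 : String) (str2 : String) : List (List Int) :=
  let distance :=
    (PySem.List.pyRange 0 ((str1.toList.length : Int) + 1) 1).foldl
      (fun d j =>
        let d := d ++ [List.replicate (str2.toList.length + 1) (0 : Int)]
        d.set j.toNat ((d.getD j.toNat []).set 0 1))
      []
  (PySem.List.pyRange 0 ((str2.toList.length : Int) + 1) 1).foldl
    (fun d k => d.set 0 ((d.getD 0 []).set k.toNat k))
    distance

-- ===== PORT B =====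
-- zip(*cols): Python zip takes one head from every column and stops at the shortest
-- (here also when the column list itself is empty); list(row) on a row is the identity.
def pvZipStar (cols : List (List Int)) : List (List Int) :=
  if h : cols ≠ [] ∧ cols.all (fun c => !c.isEmpty) then
    cols.map (fun c => c.headD 0) :: pvZipStar (cols.map (fun c => c.tail))
  else []
termination_by (cols.headD []).length
decreasing_by
  obtain ⟨hne, hall⟩ := h
  cases cols with
  | nil => exact absurd rfl hne
  | cons c rest =>
      have hc : c ≠ [] := by
        have := List.all_eq_true.mp hall c (by simp)
        simpa using this
      simp only [List.headD_cons]
      cases c with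
      | nil => exact absurd rfl hc
      | cons x xs => simp

def initArary_alt (str1 : String) (str2 : String) : List (List Int) :=
  let m := str1.toList.length
  let n := str2.toList.length
  let cols := ((0 : Int) :: List.replicate m (1 : Int)) ::
    (PySem.List.pyRange 1 ((n : Int) + 1) 1).map (fun k => k :: List.replicate m (0 : Int))
  pvZipStar cols

-- ===== PRECONDITION & SPEC =====
def Spec_initArary (str1 : String) (str2 : String) (out : List (List Int)) : Prop := out = initArary_alt str1 str2
instance (str1 : String) (str2 : String) (out : List (List Int)) : Decidable (Spec_initArary str1 str2 out) := by unfold Spec_initArary; infer_instance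

-- ===== CLAIM (what is proved, stated in full; the proofs are below) =====
def Claim_equal_initArary : Prop := ∀ (str1 : String) (str2 : String), Dom_initArary str1 str2 → Spec_initArary str1 str2 (initArary str1 str2)

-- ===== LEMMAS AND PROOFS =====

-- A side: setting the last slot of `replicate m r ++ [z]`
theorem set_last_replicate {α : Type} (r z w : α) (m : Nat) :
    (List.replicate m r ++ [z]).set m w = List.replicate m r ++ [w] := by
  induction m with
  | zero => simp
  | succ m ih => simp [List.replicate_succ, ih]

theorem getD_last_replicate {α : Type} (r z d : α) (m : Nat) :
    (List.replicate m r ++ [z]).getD m d = z := by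
  induction m with
  | zero => simp
  | succ m _ => simp [List.replicate_succ]

-- loop 1 of A builds m+1 identical rows 1 :: 0ⁿ
theorem loop1_eq (n : Nat) : ∀ (m : Nat),
    (PySem.List.pyRange 0 ((m : Int) + 1) 1).foldl
      (fun d j =>
        let d := d ++ [List.replicate (n + 1) (0 : Int)]
        d.set j.toNat ((d.getD j.toNat []).set 0 1))
      []
    = List.replicate (m + 1) ((1 : Int) :: List.replicate n (0 : Int)) := by
  intro m
  induction m with
  | zero =>
    rw [show ((0 : Nat) : Int) + 1 = (0 : Int) + 1 by norm_num,
      PySem.List.pyRange_one_singleton]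
    simp [List.replicate_succ]
  | succ m ih =>
    have h : (0 : Int) ≤ (m : Int) + 1 := by positivity
    rw [show (((m + 1 : Nat)) : Int) + 1 = ((m : Int) + 1) + 1 by push_cast; ring,
      PySem.List.pyRange_one_succ_right h, List.foldl_append, ih]
    simp only [List.foldl_cons, List.foldl_nil]
    have htn : ((m : Int) + 1).toNat = m + 1 := by omega
    rw [htn, getD_last_replicate, set_last_replicate]
    simp [List.replicate_succ' (n := m + 1)]
    simp [List.replicate_succ]

-- loop 2 of A only rewrites row 0; characterise the row-0 rewrite
theorem loop2_row (n : Nat) (r : List Int) : ∀ (j : Nat), j ≤ n + 1 → r.length = n + 1 →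
    (PySem.List.pyRange 0 (j : Int) 1).foldl (fun row k => row.set k.toNat k) r
    = (List.range j).map (fun (k : Nat) => (k : Int)) ++ r.drop j := by
  intro j
  induction j with
  | zero => simp
  | succ j ih =>
    intro hj hr
    have h0 : (0 : Int) ≤ (j : Int) := by positivity
    have : ((j + 1 : Nat) : Int) = (j : Int) + 1 := by push_cast; ring
    rw [this, PySem.List.pyRange_one_succ_right h0, List.foldl_append,
      ih (by omega) hr]
    simp only [List.foldl_cons, List.foldl_nil, Int.toNat_natCast]
    have hdrop : r.drop j = r[j]'(by omega) :: r.drop (j + 1) := by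
      exact List.drop_eq_getElem_cons (by omega)
    rw [List.set_append_right _ _ (by simp), List.range_succ]
    simp
    rw [hdrop]
    simp only [List.set_cons_zero]

-- the second loop lifted to the whole matrix (state is row0 :: rest)
theorem loop2_eq (n : Nat) (r : List Int) (rest : List (List Int)) (hr : r.length = n + 1) :
    (PySem.List.pyRange 0 ((n : Int) + 1) 1).foldl
      (fun d k => d.set 0 ((d.getD 0 []).set k.toNat k)) (r :: rest)
    = ((List.range (n + 1)).map (fun (k : Nat) => (k : Int))) :: rest := by
  have key : ∀ (l : List Int) (row : List Int) ,
      (l.foldl (fun d k => d.set 0 ((d.getD 0 []).set k.toNat k)) (row :: rest))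
      = (l.foldl (fun row k => row.set k.toNat k) row) :: rest := by
    intro l
    induction l with
    | nil => intro row; rfl
    | cons x xs ih =>
        intro row
        simp only [List.foldl_cons, List.getD_cons_zero, List.set_cons_zero]
        exact ih _
  rw [key]
  have := loop2_row n r (n + 1) (le_refl _) hr
  rw [show ((n + 1 : Nat) : Int) = (n : Int) + 1 by push_cast; ring] at this
  rw [this, List.drop_eq_nil_of_le (by omega)]
  simp

-- B side: pvZipStar on rectangular columns whose tails are constant
theorem zipStar_cols (b c : Int) : ∀ (m : Nat) (a : Int) (L : List Int),
    pvZipStar ((a :: List.replicate m b) :: L.map (fun k => k :: List.replicate m c))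
    = (a :: L) :: List.replicate m (b :: L.map (fun _ => c)) := by
  intro m
  induction m with
  | zero =>
    intro a L
    rw [pvZipStar]
    rw [dif_pos (by simp)]
    rw [pvZipStar]
    rw [dif_neg (by simp)]
    simp [Function.comp_def]
  | succ m ih =>
    intro a L
    rw [pvZipStar]
    rw [dif_pos (by simp)]
    simp only [List.replicate_succ, List.map_cons, List.map_map, Function.comp_def,
      List.headD_cons, List.tail_cons]
    have h2 : L.map (fun k => ((c : Int) :: List.replicate m c)) =
        (L.map (fun _ => (c : Int))).map (fun k => k :: List.replicate m c) := by
      simp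
    rw [h2, ih b (L.map (fun _ => c))]
    simp

-- row 0 of A's result equals row 0 of B's result
theorem row0_eq (n : Nat) :
    (List.range (n + 1)).map (fun (k : Nat) => (k : Int))
    = (0 : Int) :: (List.range n).map (fun (k : Nat) => (1 : Int) + (k : Int)) := by
  induction n with
  | zero => simp
  | succ n ih =>
      rw [List.range_succ, List.map_append, ih, List.range_succ, List.map_append]
      simp [add_comm]

theorem tail_row_eq (n : Nat) :
    ((List.range n).map (fun (k : Nat) => (1 : Int) + (k : Int))).map (fun _ => (0 : Int))
    = List.replicate n (0 : Int) := by
  apply List.ext_getElem <;> simp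

-- ===== VERDICT (by name: the statement is the Claim_ definition above) =====
theorem initArary_spec : Claim_equal_initArary := by
  intro str1 str2 _
  show initArary str1 str2 = initArary_alt str1 str2
  unfold initArary initArary_alt
  rw [loop1_eq str2.toList.length str1.toList.length, List.replicate_succ,
    loop2_eq str2.toList.length _ _ (by simp)]
  dsimp only
  rw [PySem.List.pyRange_one,
    show ((str2.toList.length : Int) + 1 - 1).toNat = str2.toList.length by omega,
    zipStar_cols, ← tail_row_eq str2.toList.length, row0_eq]
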